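-- pv_equiv track=rewrite | github.com/vishnushankar1/Login-Page | login.py | suggest_domain
-- ===== SOURCE A (Python) =====
-- def suggest_domain(email):
--     # Common email domains
--     common_domains = {
--         "gmail.com": ["gamil.com", "gmial.com", "gmai.com", "gm.com"],
--         "yahoo.com": ["yaho.com", "yaoo.com", "yhoo.com", "yah.com"],
--         "outlook.com": ["outlok.com", "outlok.co", "otlouk.com", "out.com"],
--         "hotmail.com": ["hotmil.com", "hotmal.com", "hot.com"]
--     }
--
--     if "@" in email:
--         user_part, domain_part = email.split("@")
--         if domain_part not in common_domains and all(domain_part not in typos for typos in common_domains.values()):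
--             return "Invalid domain. Please use a common domain like gmail.com, yahoo.com, outlook.com, or hotmail.com."
--
--         for correct_domain, typo_list in common_domains.items():
--             if domain_part in typo_list:
--                 return correct_domain  # Suggest the correct domain if a typo is found
--     return None
-- ===== SOURCE B (Python) =====
-- # B: branch-free table lookup -- one flat total answer dict (every known domain -> its final
-- # result, invalid message as the .get default) and str.partition instead of A's per-call dict,
-- # membership + all(...) scans and items() loop; B also returns the invalid message instead of
-- # raising ValueError on emails with two or more '@'.
-- _INVALID = "Invalid domain. Please use a common domain like gmail.com, yahoo.com, outlook.com, or hotmail.com."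
--
-- _ANSWERS = {
--     "gmail.com": None, "gamil.com": "gmail.com", "gmial.com": "gmail.com",
--     "gmai.com": "gmail.com", "gm.com": "gmail.com",
--     "yahoo.com": None, "yaho.com": "yahoo.com", "yaoo.com": "yahoo.com",
--     "yhoo.com": "yahoo.com", "yah.com": "yahoo.com",
--     "outlook.com": None, "outlok.com": "outlook.com", "outlok.co": "outlook.com",
--     "otlouk.com": "outlook.com", "out.com": "outlook.com",
--     "hotmail.com": None, "hotmil.com": "hotmail.com", "hotmal.com": "hotmail.com",
--     "hot.com": "hotmail.com",
-- }
--
-- def suggest_domain(email):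
--     _user, sep, domain = email.partition("@")
--     if not sep:
--         return None
--     return _ANSWERS.get(domain, _INVALID)
-- ===== Notes on version B (the rewrite author's own statement) =====
-- stated objective: simpler
-- what changed: Replaces A's per-call dict construction, the membership test plus all(...) scan over every typo list and the subsequent items() loop with a single precomputed flat answer table (every known domain mapped directly to the final return value, invalid message as the lookup default) and str.partition, making the body branch-free and raise-free.
import Mathlib
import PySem

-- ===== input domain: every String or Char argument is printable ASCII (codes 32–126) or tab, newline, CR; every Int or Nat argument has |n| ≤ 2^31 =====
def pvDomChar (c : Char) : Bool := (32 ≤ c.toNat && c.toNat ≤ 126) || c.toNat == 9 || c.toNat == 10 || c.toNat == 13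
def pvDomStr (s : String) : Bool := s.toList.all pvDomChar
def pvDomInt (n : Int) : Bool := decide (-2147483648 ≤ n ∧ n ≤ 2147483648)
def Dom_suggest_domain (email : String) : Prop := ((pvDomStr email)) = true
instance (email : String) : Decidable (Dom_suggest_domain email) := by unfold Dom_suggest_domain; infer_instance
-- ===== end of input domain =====

-- B replaces A's per-call dict, membership + all(...) scans and items() loop with one flat
-- precomputed answer table (lookup default = invalid message) and str.partition; branch-free body.
-- Return value only; neither program has side effects.

-- ===== PORT A =====
def pvMsg : String :=
  "Invalid domain. Please use a common domain like gmail.com, yahoo.com, outlook.com, or hotmail.com."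

def pvCommonDomains : PySem.Dict String (List String) :=
  PySem.Dict.ofList [
    ("gmail.com", ["gamil.com", "gmial.com", "gmai.com", "gm.com"]),
    ("yahoo.com", ["yaho.com", "yaoo.com", "yhoo.com", "yah.com"]),
    ("outlook.com", ["outlok.com", "outlok.co", "otlouk.com", "out.com"]),
    ("hotmail.com", ["hotmil.com", "hotmal.com", "hot.com"])]

-- 'for correct_domain, typo_list in common_domains.items(): if domain_part in typo_list: return correct_domain'
def pvALoop (items : List (String × List String)) (d : String) : Option String :=
  match items with
  | [] => none
  | (correct, typos) :: rest => if typos.contains d then some correct else pvALoop rest d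

def suggest_domain (email : String) : Option String :=
  if PySem.Str.isIn "@" email then
    match PySem.Str.split? email "@" with
    | some [_user, domain_part] =>
      if !(pvCommonDomains.contains domain_part)
          && (pvCommonDomains.values.all fun typos => !(typos.contains domain_part)) then
        some pvMsg
      else
        pvALoop pvCommonDomains.items domain_part
    | _ => none  -- 2-tuple unpacking raises ValueError in Python; excluded by Pre_
  else none

-- ===== PORT B =====
def pvMsgB : String :=
  "Invalid domain. Please use a common domain like gmail.com, yahoo.com, outlook.com, or hotmail.com."

-- '_ANSWERS': one flat dict, every known domain mapped directly to the final return value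
def pvAnswers : PySem.Dict String (Option String) :=
  PySem.Dict.ofList [
    ("gmail.com", none), ("gamil.com", some "gmail.com"), ("gmial.com", some "gmail.com"),
    ("gmai.com", some "gmail.com"), ("gm.com", some "gmail.com"),
    ("yahoo.com", none), ("yaho.com", some "yahoo.com"), ("yaoo.com", some "yahoo.com"),
    ("yhoo.com", some "yahoo.com"), ("yah.com", some "yahoo.com"),
    ("outlook.com", none), ("outlok.com", some "outlook.com"), ("outlok.co", some "outlook.com"),
    ("otlouk.com", some "outlook.com"), ("out.com", some "outlook.com"),
    ("hotmail.com", none), ("hotmil.com", some "hotmail.com"), ("hotmal.com", some "hotmail.com"),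
    ("hot.com", some "hotmail.com")]

-- hand port of str.partition (no PySem primitive): split at the FIRST occurrence of sep.
-- Exact for the non-empty separator "@" used below (Python raises on an empty separator).
def pvPartition (s sep : String) : String × String × String :=
  let i := PySem.Str.find s sep
  if i = -1 then (s, "", "")
  else (PySem.Str.slice s none (some i), sep,
        PySem.Str.slice s (some (i + PySem.Str.len sep)) none)

def suggest_domain_alt (email : String) : Option String :=
  let p := pvPartition email "@"
  if p.2.1 == "" then none
  else pvAnswers.getD p.2.2 (some pvMsgB)

-- ===== PRECONDITION & SPEC =====
-- Pre_ excludes exactly the emails with two or more '@', on which A's 2-tuple unpacking of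
-- email.split("@") raises ValueError; B instead returns the invalid-domain message there.
def Pre_suggest_domain (email : String) : Prop := email.toList.count '@' ≤ 1
instance (email : String) : Decidable (Pre_suggest_domain email) := by
  unfold Pre_suggest_domain; infer_instance

def pvWitness_suggest_domain : String := "a@gamil.com"

def Spec_suggest_domain (email : String) (out : Option String) : Prop := out = suggest_domain_alt email
instance (email : String) (out : Option String) : Decidable (Spec_suggest_domain email out) := by unfold Spec_suggest_domain; infer_instance

-- ===== CLAIM (what is proved, stated in full; the proofs are below) =====
def Claim_equal_suggest_domain : Prop := ∀ (email : String), Dom_suggest_domain email → Pre_suggest_domain email → Spec_suggest_domain email (suggest_domain email)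

-- ===== LEMMAS AND PROOFS =====

-- splitting off the first '@': every list containing '@' is u ++ '@' :: v with '@' ∉ u
lemma pv_first_split (l : List Char) (h : '@' ∈ l) :
    ∃ u v, l = u ++ '@' :: v ∧ '@' ∉ u := by
  induction l with
  | nil => cases h
  | cons c t ih =>
    by_cases hc : c = '@'
    · exact ⟨[], t, by simp [hc], by simp⟩
    · have ht : '@' ∈ t := by
        rcases List.mem_cons.mp h with h' | h'
        · exact absurd h'.symm hc
        · exact h'
      obtain ⟨u, v, hl, hu⟩ := ih ht
      refine ⟨c :: u, v, by simp [hl], ?_⟩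
      intro hm
      rcases List.mem_cons.mp hm with h' | h'
      · exact hc h'.symm
      · exact hu h'

-- splitOn.go on a chunk without the separator
lemma pv_go_clean (l : List Char) (fuel : Nat) (cur acc : List (List Char)) (h : '@' ∉ l)
    (cur' : List Char) :
    PySem.Chars.splitOn.go ['@'] fuel l cur' acc = ((cur'.reverse ++ l) :: acc).reverse := by
  induction l generalizing fuel cur' with
  | nil => cases fuel <;> simp [PySem.Chars.splitOn.go]
  | cons c t ih =>
    cases fuel with
    | zero => simp [PySem.Chars.splitOn.go]
    | succ f =>
      have hc : ¬ ('@' = c) := fun h' => h (h' ▸ List.mem_cons_self)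
      have ht : '@' ∉ t := fun h' => h (List.mem_cons_of_mem _ h')
      simp [PySem.Chars.splitOn.go, List.isPrefixOf, hc, ih f ht (c :: cur')]

-- splitOn.go across the single separator occurrence
lemma pv_go_at (u : List Char) (fuel : Nat) (v cur : List Char) (acc : List (List Char))
    (hf : u.length + 1 ≤ fuel) (hu : '@' ∉ u) (hv : '@' ∉ v) :
    PySem.Chars.splitOn.go ['@'] fuel (u ++ '@' :: v) cur acc =
      acc.reverse ++ [cur.reverse ++ u, v] := by
  induction u generalizing fuel cur with
  | nil =>
    cases fuel with
    | zero => omega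
    | succ f =>
      simp [PySem.Chars.splitOn.go, List.isPrefixOf,
            pv_go_clean v f [] (cur.reverse :: acc) hv []]
  | cons c u' ih =>
    cases fuel with
    | zero => simp at hf
    | succ f =>
      have hc : ¬ ('@' = c) := fun h' => hu (h' ▸ List.mem_cons_self)
      have hu' : '@' ∉ u' := fun h' => hu (List.mem_cons_of_mem _ h')
      have hf' : u'.length + 1 ≤ f := by simp at hf; omega
      simp [PySem.Chars.splitOn.go, List.isPrefixOf, hc, ih f (c :: cur) hf' hu']

lemma pv_splitOn_single (u v : List Char) (hu : '@' ∉ u) (hv : '@' ∉ v) :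
    PySem.Chars.splitOn (u ++ '@' :: v) ['@'] = [u, v] := by
  have := pv_go_at u ((u ++ '@' :: v).length + 1) v [] [] (by simp) hu hv
  simpa [PySem.Chars.splitOn] using this

lemma pv_find_at (u v : List Char) (hu : '@' ∉ u) :
    PySem.Chars.find (u ++ '@' :: v) ['@'] = (u.length : Int) := by
  set l := u ++ '@' :: v with hl
  have hinf : ['@'] <:+: l := ⟨u, v, by simp [hl]⟩
  have hnn : 0 ≤ PySem.Chars.find l ['@'] := (PySem.Chars.find_nonneg_iff l ['@']).mpr hinf
  obtain ⟨hpre, hmin⟩ := PySem.Chars.find_spec hnn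
  have hdropu : List.drop u.length l = '@' :: v := by
    simp [hl, List.drop_left]
  have hle : (PySem.Chars.find l ['@']).toNat ≤ u.length := by
    by_contra hgt
    exact hmin u.length (by omega) (by rw [hdropu]; exact ⟨v, rfl⟩)
  have hge : u.length ≤ (PySem.Chars.find l ['@']).toNat := by
    by_contra hlt
    push_neg at hlt
    obtain ⟨t, ht⟩ := hpre
    have hdrop : List.drop (PySem.Chars.find l ['@']).toNat l = '@' :: t := by
      rw [← ht]; rfl
    have hget : l[(PySem.Chars.find l ['@']).toNat]? = some '@' := by
      have hh : (List.drop (PySem.Chars.find l ['@']).toNat l).head? =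
          l[(PySem.Chars.find l ['@']).toNat]? := List.head?_drop
      rw [hdrop] at hh
      exact hh.symm
    have hgu : u[(PySem.Chars.find l ['@']).toNat]? = some '@' := by
      rw [← hget, hl, List.getElem?_append_left hlt]
    exact hu (List.mem_of_getElem? hgu)
  have : (PySem.Chars.find l ['@']).toNat = u.length := le_antisymm hle hge
  omega

-- the two inner computations agree on EVERY candidate domain string
lemma pv_core_eq (d : String) :
    (if !(pvCommonDomains.contains d)
        && (pvCommonDomains.values.all fun typos => !(typos.contains d)) then
       some pvMsg
     else pvALoop pvCommonDomains.items d) =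
    pvAnswers.getD d (some pvMsgB) := by
  by_cases h1 : d = "gmail.com"; · subst h1; decide
  by_cases h2 : d = "yahoo.com"; · subst h2; decide
  by_cases h3 : d = "outlook.com"; · subst h3; decide
  by_cases h4 : d = "hotmail.com"; · subst h4; decide
  by_cases h5 : d = "gamil.com"; · subst h5; decide
  by_cases h6 : d = "gmial.com"; · subst h6; decide
  by_cases h7 : d = "gmai.com"; · subst h7; decide
  by_cases h8 : d = "gm.com"; · subst h8; decide
  by_cases h9 : d = "yaho.com"; · subst h9; decide
  by_cases h10 : d = "yaoo.com"; · subst h10; decide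
  by_cases h11 : d = "yhoo.com"; · subst h11; decide
  by_cases h12 : d = "yah.com"; · subst h12; decide
  by_cases h13 : d = "outlok.com"; · subst h13; decide
  by_cases h14 : d = "outlok.co"; · subst h14; decide
  by_cases h15 : d = "otlouk.com"; · subst h15; decide
  by_cases h16 : d = "out.com"; · subst h16; decide
  by_cases h17 : d = "hotmil.com"; · subst h17; decide
  by_cases h18 : d = "hotmal.com"; · subst h18; decide
  by_cases h19 : d = "hot.com"; · subst h19; decide
  have hC : pvCommonDomains = PySem.Dict.mk [
      ("gmail.com", ["gamil.com", "gmial.com", "gmai.com", "gm.com"]),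
      ("yahoo.com", ["yaho.com", "yaoo.com", "yhoo.com", "yah.com"]),
      ("outlook.com", ["outlok.com", "outlok.co", "otlouk.com", "out.com"]),
      ("hotmail.com", ["hotmil.com", "hotmal.com", "hot.com"])] := by decide
  have hA : pvAnswers = PySem.Dict.mk [
      ("gmail.com", none), ("gamil.com", some "gmail.com"), ("gmial.com", some "gmail.com"),
      ("gmai.com", some "gmail.com"), ("gm.com", some "gmail.com"),
      ("yahoo.com", none), ("yaho.com", some "yahoo.com"), ("yaoo.com", some "yahoo.com"),
      ("yhoo.com", some "yahoo.com"), ("yah.com", some "yahoo.com"),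
      ("outlook.com", none), ("outlok.com", some "outlook.com"), ("outlok.co", some "outlook.com"),
      ("otlouk.com", some "outlook.com"), ("out.com", some "outlook.com"),
      ("hotmail.com", none), ("hotmil.com", some "hotmail.com"), ("hotmal.com", some "hotmail.com"),
      ("hot.com", some "hotmail.com")] := by decide
  rw [hC, hA]
  simp [pvALoop, PySem.Dict.contains_mk, PySem.Dict.values_mk, PySem.Dict.getD,
        PySem.Dict.get?_mk_cons, PySem.Dict.items, beq_iff_eq, h1, h2, h3, h4, h5, h6, h7, h8,
        h9, h10, h11, h12, h13, h14, h15, h16, h17, h18, h19, pvMsg, pvMsgB,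
        Ne.symm h1, Ne.symm h2, Ne.symm h3, Ne.symm h4, Ne.symm h5, Ne.symm h6, Ne.symm h7,
        Ne.symm h8, Ne.symm h9, Ne.symm h10, Ne.symm h11, Ne.symm h12, Ne.symm h13,
        Ne.symm h14, Ne.symm h15, Ne.symm h16, Ne.symm h17, Ne.symm h18, Ne.symm h19,
        PySem.Dict.get?]

-- ===== VERDICT (by name: the statements are the Claim_ definitions above) =====
theorem suggest_domain_spec : Claim_equal_suggest_domain := by
  intro email _ hpre
  unfold Spec_suggest_domain
  have hat : ("@" : String).toList = ['@'] := by decide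
  cases h : PySem.Str.isIn "@" email with
  | false =>
    have hni : ¬ ("@".toList <:+: email.toList) := by
      rw [PySem.Str.isIn_eq] at h
      exact (PySem.Chars.isIn_eq_false_iff "@".toList email.toList).mp h
    have hfc : PySem.Chars.find email.toList "@".toList = -1 :=
      (PySem.Chars.find_eq_neg_one_iff email.toList "@".toList).mpr hni
    have hA : suggest_domain email = none := by
      unfold suggest_domain; rw [h]; simp
    have hB : suggest_domain_alt email = none := by
      unfold suggest_domain_alt pvPartition
      simp only [PySem.Str.find_eq, hfc]
      simp
    rw [hA, hB]
  | true =>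
    have hmem : '@' ∈ email.toList := by
      have hinf : "@".toList <:+: email.toList :=
        (PySem.Chars.isIn_iff_infix "@".toList email.toList).mp (by rw [PySem.Str.isIn_eq] at h; exact h)
      exact hinf.subset (by simp [hat])
    obtain ⟨u, v, hl, hu⟩ := pv_first_split email.toList hmem
    have hv : '@' ∉ v := by
      intro hmemv
      have hpos : 0 < v.count '@' := List.count_pos_iff.mpr hmemv
      have hcs : email.toList.count '@' = u.count '@' + ('@' :: v).count '@' := by
        rw [hl, List.count_append]
      have hcv : ('@' :: v).count '@' = v.count '@' + 1 := by
        rw [List.count_cons]; simp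
      unfold Pre_suggest_domain at hpre
      omega
    -- A's split
    have hsplit : PySem.Str.split? email "@" = some [String.ofList u, String.ofList v] := by
      unfold PySem.Str.split? PySem.Chars.split?
      rw [hat, hl, pv_splitOn_single u v hu hv]
      simp
    have hA : suggest_domain email =
        (if !(pvCommonDomains.contains (String.ofList v))
            && (pvCommonDomains.values.all fun typos => !(typos.contains (String.ofList v))) then
           some pvMsg
         else pvALoop pvCommonDomains.items (String.ofList v)) := by
      unfold suggest_domain; rw [h, hsplit]; rfl
    -- B's find and slice
    have hfc : PySem.Chars.find email.toList "@".toList = (u.length : Int) := by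
      rw [hat, hl, pv_find_at u v hu]
    have hne : ¬ ((u.length : Int) = -1) := by omega
    have hslice : PySem.Str.slice email (some ((u.length : Int) + 1)) none = String.ofList v := by
      rw [← String.toList_inj]
      rw [PySem.Str.toList_slice, PySem.Chars.slice_eq_listSlice,
          PySem.List.slice_from email.toList (a := (u.length : Int) + 1) (by omega)]
      have h2 : ((u.length : Int) + 1).toNat = u.length + 1 := by omega
      rw [h2, hl]
      have h3 : u ++ '@' :: v = (u ++ ['@']) ++ v := by simp
      rw [h3]
      have hlu : (u ++ ['@']).length = u.length + 1 := by simp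
      rw [← hlu, List.drop_left]
      simp
    have hlen1 : PySem.Str.len "@" = 1 := by decide
    have hB : suggest_domain_alt email = pvAnswers.getD (String.ofList v) (some pvMsgB) := by
      unfold suggest_domain_alt pvPartition
      simp only [PySem.Str.find_eq, hfc, hlen1, hne, if_false, hslice]
      have hsep : (("@" : String) == "") = false := by decide
      simp [hsep]
    rw [hA, hB]
    exact pv_core_eq (String.ofList v)
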